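-- pv_equiv track=rewrite | github.com/mimminou/PDBASER | GUI/Build/oasa3-lib/oasa3/inchi.py | _split_h_layer
-- ===== SOURCE A (Python) =====
-- def _split_h_layer( layer):
--   was_h = False
--   chunks = []
--   chunk = ""
--   for c in layer:
--     if c == 'H':
--       was_h = True
--       chunk += c
--     elif c == "," and was_h:
--       was_h = False
--       chunks.append( chunk)
--       chunk = ""
--     else:
--       chunk += c
--   if chunk:
--     chunks.append( chunk)
--   return chunks
-- ===== SOURCE B (Python) =====
-- def _split_h_layer(layer):
--     parts = layer.split(',')
--     chunks = []
--     acc = parts[0]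
--     for p in parts[1:]:
--         if 'H' in acc:
--             chunks.append(acc)
--             acc = p
--         else:
--             acc = acc + ',' + p
--     if acc:
--         chunks.append(acc)
--     return chunks
-- ===== Notes on version B (the rewrite author's own statement) =====
-- stated objective: simpler
-- what changed: Replaced the character-by-character state machine (was_h flag, per-character appends) with a tokenize-then-merge pass: split the layer on commas once with str.split, then fold over the parts, emitting the accumulator and starting a new chunk when it contains an H and re-joining with a comma otherwise.
import Mathlib
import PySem

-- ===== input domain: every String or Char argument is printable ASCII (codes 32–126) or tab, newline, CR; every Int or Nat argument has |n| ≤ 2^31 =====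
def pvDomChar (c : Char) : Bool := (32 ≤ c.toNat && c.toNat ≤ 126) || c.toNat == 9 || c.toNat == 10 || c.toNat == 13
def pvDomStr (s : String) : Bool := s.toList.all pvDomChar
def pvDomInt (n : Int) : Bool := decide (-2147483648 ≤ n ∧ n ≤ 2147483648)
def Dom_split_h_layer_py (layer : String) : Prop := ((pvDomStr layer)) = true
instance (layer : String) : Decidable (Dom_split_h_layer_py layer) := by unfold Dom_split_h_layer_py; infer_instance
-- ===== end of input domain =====

-- B replaces A's character-by-character state machine with split-on-comma followed by a
-- re-merge fold over the parts (objective: simpler decomposition, same result).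

-- ===== PORT A =====
-- one loop step of A: state (was_h, chunks, chunk), Python's `chunk += c` is `chunk ++ [c]`
def pvAStep (st : Bool × List (List Char) × List Char) (c : Char) :
    Bool × List (List Char) × List Char :=
  match st with
  | (wasH, chunks, chunk) =>
    if c = 'H' then (true, chunks, chunk ++ [c])
    else if c = ',' ∧ wasH = true then (false, chunks ++ [chunk], [])
    else (wasH, chunks, chunk ++ [c])

def split_h_layer_py (layer : String) : List String :=
  let st := layer.toList.foldl pvAStep (false, [], [])
  (if st.2.2 ≠ [] then st.2.1 ++ [st.2.2] else st.2.1).map String.ofList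

-- ===== PORT B =====
-- hand port of Python's layer.split(',') returned as (first part, later parts);
-- exact: a comma always opens a new (possibly empty) part, so ''.split(',') == ['']
def pvSplitComma : List Char → List Char × List (List Char)
  | [] => ([], [])
  | c :: cs =>
    let r := pvSplitComma cs
    if c = ',' then ([], r.1 :: r.2) else (c :: r.1, r.2)

-- Source B's merge loop: acc = first part, re-join a later part unless acc contains an 'H'
def pvMerge (acc : List Char) : List (List Char) → List (List Char)
  | [] => if acc ≠ [] then [acc] else []
  | p :: ps => if acc.contains 'H' then acc :: pvMerge p ps else pvMerge (acc ++ ',' :: p) ps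

def split_h_layer_py_alt (layer : String) : List String :=
  let parts := pvSplitComma layer.toList
  (pvMerge parts.1 parts.2).map String.ofList

-- ===== PRECONDITION & SPEC =====
def Spec_split_h_layer_py (layer : String) (out : List String) : Prop := out = split_h_layer_py_alt layer
instance (layer : String) (out : List String) : Decidable (Spec_split_h_layer_py layer out) := by unfold Spec_split_h_layer_py; infer_instance

-- ===== CLAIM (what is proved, stated in full; the proofs are below) =====
def Claim_equal_split_h_layer_py : Prop := ∀ (layer : String), Dom_split_h_layer_py layer → Spec_split_h_layer_py layer (split_h_layer_py layer)

-- ===== LEMMAS AND PROOFS =====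

-- A's final `if chunk: chunks.append(chunk)` as a function of the loop state
def pvFinal (st : Bool × List (List Char) × List Char) : List (List Char) :=
  if st.2.2 ≠ [] then st.2.1 ++ [st.2.2] else st.2.1

-- loop invariant: was_h is true exactly when the current chunk contains an 'H';
-- from any such state A's remaining loop + final guard equals B's merge of the comma parts
theorem pvKey (cs : List Char) : ∀ (chunks : List (List Char)) (chunk : List Char),
    pvFinal (cs.foldl pvAStep (chunk.contains 'H', chunks, chunk)) =
      chunks ++ pvMerge (chunk ++ (pvSplitComma cs).1) (pvSplitComma cs).2 := by
  induction cs with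
  | nil =>
    intro chunks chunk
    simp [pvFinal, pvSplitComma, pvMerge]
    split_ifs <;> simp_all
  | cons c cs ih =>
    intro chunks chunk
    by_cases hH : c = 'H'
    · subst hH
      have h1 : pvAStep (chunk.contains 'H', chunks, chunk) 'H'
          = ((chunk ++ ['H']).contains 'H', chunks, chunk ++ ['H']) := by
        simp [pvAStep]
      rw [List.foldl_cons, h1, ih]
      simp [pvSplitComma]
    · by_cases hc : c = ','
      · subst hc
        by_cases hw : 'H' ∈ chunk
        · have h1 : pvAStep (chunk.contains 'H', chunks, chunk) ','
              = (([] : List Char).contains 'H', chunks ++ [chunk], []) := by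
            simp [pvAStep, hw]
          rw [List.foldl_cons, h1, ih]
          simp [pvSplitComma, pvMerge, hw]
        · have h1 : pvAStep (chunk.contains 'H', chunks, chunk) ','
              = ((chunk ++ [',']).contains 'H', chunks, chunk ++ [',']) := by
            simp [pvAStep, hw]
          rw [List.foldl_cons, h1, ih]
          simp [pvSplitComma, pvMerge, hw]
      · have h1 : pvAStep (chunk.contains 'H', chunks, chunk) c
            = ((chunk ++ [c]).contains 'H', chunks, chunk ++ [c]) := by
          simp [pvAStep, hH, hc]
          exact fun h => absurd h.symm hH
        rw [List.foldl_cons, h1, ih]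
        simp [pvSplitComma, hc]

-- ===== VERDICT (by name: the statement is the Claim_ definition above) =====
theorem split_h_layer_py_spec : Claim_equal_split_h_layer_py := by
  intro layer _
  unfold Spec_split_h_layer_py split_h_layer_py split_h_layer_py_alt
  have := pvKey layer.toList [] []
  simp [pvFinal] at this
  simp [this]
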